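-- pv_equiv track=rewrite | github.com/cory-weller/Xmera | bin/buildMutagenicRTs.py | getSNPs
-- ===== SOURCE A (Python) =====
-- def getDistance(string1, string2):
--     dist = 0
--     for i in zip(string1, string2):
--         if i[0] != i[1]:
--             dist +=1
--     return(dist)
--
-- def getSNPs(table):
--     snps = {}
--     for codon1 in table:
--         snps[codon1] = []
--         for codon2 in table:
--             if (getDistance(codon1, codon2) == 1):
--                 snps[codon1].append(codon2)
--     return(snps)
-- ===== SOURCE B (Python) =====
-- def getSNPs(table):
--     # Distinct codons in first-occurrence order; duplicates in the table give
--     # identical rows, so each distance is computed once per unordered pair.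
--     order = list(dict.fromkeys(table))
--     near = set()
--     rest = order
--     while rest:
--         a, rest = rest[0], rest[1:]
--         for b in rest:
--             if sum(x != y for x, y in zip(a, b)) == 1:
--                 near.add((a, b))
--                 near.add((b, a))
--     return {u: [c for c in table if (u, c) in near] for u in order}
-- ===== Notes on version B (the rewrite author's own statement) =====
-- stated objective: faster
-- what changed: B dedups the table first, computes each symmetric distance once per unordered pair of distinct codons into a set of distance-1 pairs, and then builds each row by set membership, instead of A's full n*n distance recomputation with dict mutation.
import Mathlib
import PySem

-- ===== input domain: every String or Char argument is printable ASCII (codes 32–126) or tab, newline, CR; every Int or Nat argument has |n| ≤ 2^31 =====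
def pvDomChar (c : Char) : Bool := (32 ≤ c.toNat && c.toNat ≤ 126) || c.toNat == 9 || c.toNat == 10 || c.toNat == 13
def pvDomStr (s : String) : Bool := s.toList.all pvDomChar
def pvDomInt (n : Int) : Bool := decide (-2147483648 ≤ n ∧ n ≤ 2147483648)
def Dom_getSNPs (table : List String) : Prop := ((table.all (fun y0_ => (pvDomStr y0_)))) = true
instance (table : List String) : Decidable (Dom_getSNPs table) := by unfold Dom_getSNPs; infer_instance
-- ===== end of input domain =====

-- B dedups the table, computes each symmetric distance once per unordered pair of
-- distinct codons into a set of distance-1 pairs, and builds rows by membership;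
-- proved to return exactly A's dict (as an association list) on every input.

-- ===== PORT A =====
def getDistance (string1 string2 : String) : Int :=
  (List.zip string1.toList string2.toList).foldl
    (fun dist i => if i.1 ≠ i.2 then dist + 1 else dist) 0

def getSNPs (table : List String) : List (String × List String) :=
  (table.foldl
    (fun snps codon1 =>
      table.foldl
        (fun snps codon2 =>
          if getDistance codon1 codon2 == 1 then
            snps.modify codon1 [] (fun l => l ++ [codon2])
          else snps)
        (snps.insert codon1 []))
    (PySem.Dict.empty : PySem.Dict String (List String))).items

-- ===== PORT B =====
def distOne (a b : String) : Bool :=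
  (List.zip a.toList b.toList).foldl
    (fun acc i => acc + (if i.1 ≠ i.2 then (1 : Int) else 0)) 0 == 1

def nearPairs : List String → PySem.Set (String × String) → PySem.Set (String × String)
  | [], near => near
  | a :: rest, near =>
      nearPairs rest
        (rest.foldl
          (fun near b =>
            if distOne a b then
              PySem.Set.add (PySem.Set.add near (a, b)) (b, a)
            else near)
          near)

def getSNPs_alt (table : List String) : List (String × List String) :=
  let order := PySem.List.dedup table
  let near := nearPairs order PySem.Set.empty
  order.map (fun u => (u, table.filter (fun c => PySem.Set.contains near (u, c))))

-- ===== PRECONDITION & SPEC =====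
def Spec_getSNPs (table : List String) (out : List (String × List String)) : Prop := out = getSNPs_alt table
instance (table : List String) (out : List (String × List String)) : Decidable (Spec_getSNPs table out) := by unfold Spec_getSNPs; infer_instance

-- ===== CLAIM (what is proved, stated in full; the proofs are below) =====
def Claim_equal_getSNPs : Prop := ∀ (table : List String), Dom_getSNPs table → Spec_getSNPs table (getSNPs table)

-- ===== LEMMAS AND PROOFS =====

theorem distOne_eq (a b : String) : distOne a b = (getDistance a b == 1) := by
  have h : ∀ (l : List (Char × Char)) (d : Int),
      l.foldl (fun acc i => acc + (if i.1 ≠ i.2 then (1:Int) else 0)) d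
        = l.foldl (fun dist i => if i.1 ≠ i.2 then dist + 1 else dist) d := by
    intro l
    induction l with
    | nil => intro d; rfl
    | cons x t ih => intro d; simp only [List.foldl]; rw [ih]; split_ifs <;> simp
  unfold distOne getDistance
  rw [h]

theorem getDistance_self (a : String) : getDistance a a = 0 := by
  unfold getDistance
  have h : ∀ (l : List Char) (d : Int),
      (List.zip l l).foldl (fun dist i => if i.1 ≠ i.2 then dist + 1 else dist) d = d := by
    intro l
    induction l with
    | nil => intro d; rfl
    | cons x t ih => intro d; simpa using ih d
  exact h a.toList 0

theorem getDistance_comm (a b : String) : getDistance a b = getDistance b a := by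
  unfold getDistance
  have h : ∀ (l m : List Char) (d : Int),
      (List.zip l m).foldl (fun dist i => if i.1 ≠ i.2 then dist + 1 else dist) d
        = (List.zip m l).foldl (fun dist i => if i.1 ≠ i.2 then dist + 1 else dist) d := by
    intro l
    induction l with
    | nil => intro m d; cases m <;> rfl
    | cons x t ih =>
        intro m d
        cases m with
        | nil => rfl
        | cons y u =>
            simp only [List.zip_cons_cons, List.foldl]
            rw [ih]
            congr 1
            split_ifs with h1 h2 h2 <;> first | rfl | (exact absurd h1.symm h2) | (exact absurd h2.symm h1)
  exact h a.toList b.toList 0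

/-- Canonical description of the result both ports are proved equal to. -/
def snpRows (table : List String) : List (String × List String) :=
  (PySem.List.dedup table).map
    (fun u => (u, table.filter (fun c => getDistance u c == 1)))

-- ---------- A side ----------

theorem inner_getD (c1 k : String) (l : List String)
    (d : PySem.Dict String (List String)) :
    (l.foldl (fun snps codon2 =>
        if getDistance c1 codon2 == 1 then snps.modify c1 [] (fun v => v ++ [codon2]) else snps) d).getD k []
      = d.getD k [] ++ (if k = c1 then l.filter (fun c => getDistance c1 c == 1) else []) := by
  induction l generalizing d with
  | nil => simp
  | cons b t ih =>
      simp only [List.foldl, List.filter]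
      by_cases hb : getDistance c1 b == 1
      · rw [if_pos hb, ih]
        rw [PySem.Dict.getD_modify]
        by_cases hk : k = c1
        · subst hk; simp [hb]
        · simp [hk]
      · rw [if_neg hb, ih]
        simp [hb]

theorem inner_keys (c1 : String) (l : List String)
    (d : PySem.Dict String (List String)) (hc : d.contains c1 = true) :
    (l.foldl (fun snps codon2 =>
        if getDistance c1 codon2 == 1 then snps.modify c1 [] (fun v => v ++ [codon2]) else snps) d).keys
      = d.keys := by
  induction l generalizing d with
  | nil => rfl
  | cons b t ih =>
      simp only [List.foldl]
      by_cases hb : getDistance c1 b == 1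
      · rw [if_pos hb, ih]
        · rw [PySem.Dict.keys_modify, PySem.Dict.keys_insert_of_contains _ _ hc]
        · rw [PySem.Dict.contains_modify]; simp [hc]
      · rw [if_neg hb, ih _ hc]

theorem outer_keys (table l : List String) (d : PySem.Dict String (List String)) :
    (l.foldl (fun snps codon1 =>
        table.foldl (fun snps codon2 =>
            if getDistance codon1 codon2 == 1 then snps.modify codon1 [] (fun v => v ++ [codon2]) else snps)
          (snps.insert codon1 [])) d).keys
      = PySem.Set.update d.keys l := by
  induction l generalizing d with
  | nil => simp [PySem.Set.update_nil]
  | cons c1 t ih =>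
      simp only [List.foldl]
      rw [ih, inner_keys c1 table _ (PySem.Dict.contains_insert_self _ _ _),
          PySem.Set.update_cons]
      congr 1
      rw [PySem.Set.add_eq_ite]
      by_cases hc : c1 ∈ d.keys
      · have hc' : d.contains c1 = true := by
          rw [PySem.Dict.contains_eq_decide_mem_keys]; simpa
        rw [PySem.Dict.keys_insert_of_contains _ _ hc', if_pos hc]
      · have hc' : d.contains c1 = false := by
          rw [PySem.Dict.contains_eq_decide_mem_keys]; simpa
        rw [PySem.Dict.keys_insert_of_not_contains _ _ hc', if_neg hc]

theorem outer_getD (table l : List String) (u : String)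
    (d : PySem.Dict String (List String)) :
    (l.foldl (fun snps codon1 =>
        table.foldl (fun snps codon2 =>
            if getDistance codon1 codon2 == 1 then snps.modify codon1 [] (fun v => v ++ [codon2]) else snps)
          (snps.insert codon1 [])) d).getD u []
      = if u ∈ l then table.filter (fun c => getDistance u c == 1) else d.getD u [] := by
  induction l generalizing d with
  | nil => simp
  | cons c1 t ih =>
      simp only [List.foldl]
      rw [ih]
      by_cases ht : u ∈ t
      · simp [ht, List.mem_cons]
      · rw [if_neg ht, inner_getD, PySem.Dict.getD_insert]
        by_cases hu : u = c1
        · subst hu; simp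
        · simp [hu, ht]

theorem getSNPs_eq_snpRows (table : List String) : getSNPs table = snpRows table := by
  unfold getSNPs snpRows
  set D := table.foldl
    (fun snps codon1 =>
      table.foldl
        (fun snps codon2 =>
          if getDistance codon1 codon2 == 1 then snps.modify codon1 [] (fun l => l ++ [codon2]) else snps)
        (snps.insert codon1 []))
    (PySem.Dict.empty : PySem.Dict String (List String)) with hD
  have hkeys : D.keys = PySem.List.dedup table := by
    rw [hD, outer_keys]
    simp [PySem.Dict.keys_empty, PySem.Set.update_nil_left, PySem.List.dedup_eq_ofList]
  have hnd : D.keys.Nodup := by rw [hkeys]; exact PySem.List.nodup_dedup table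
  rw [PySem.Dict.items_eq_map_keys D hnd [], hkeys]
  apply List.map_congr_left
  intro u hu
  have hu' : u ∈ table := (PySem.List.mem_dedup _ _).mp hu
  rw [hD, outer_getD, if_pos hu']

-- ---------- B side ----------

theorem mem_innerB (a u c : String) (l : List String) (s : PySem.Set (String × String)) :
    (u, c) ∈ l.foldl (fun near b =>
        if distOne a b then PySem.Set.add (PySem.Set.add near (a, b)) (b, a) else near) s
      ↔ (u, c) ∈ s
        ∨ (u = a ∧ c ∈ l ∧ distOne a c = true)
        ∨ (c = a ∧ u ∈ l ∧ distOne a u = true) := by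
  induction l generalizing s with
  | nil => simp
  | cons b t ih =>
      simp only [List.foldl]
      by_cases hb : distOne a b
      · rw [if_pos hb, ih]
        simp only [PySem.Set.mem_add, List.mem_cons, Prod.mk.injEq]
        constructor
        · rintro (((h | ⟨h1, h2⟩) | ⟨h1, h2⟩) | h | h)
          · exact Or.inl h
          · subst h1 h2; exact Or.inr (Or.inl ⟨rfl, Or.inl rfl, hb⟩)
          · subst h1 h2; exact Or.inr (Or.inr ⟨rfl, Or.inl rfl, hb⟩)
          · exact Or.inr (Or.inl ⟨h.1, Or.inr h.2.1, h.2.2⟩)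
          · exact Or.inr (Or.inr ⟨h.1, Or.inr h.2.1, h.2.2⟩)
        · rintro (h | ⟨h1, (h2 | h2), h3⟩ | ⟨h1, (h2 | h2), h3⟩)
          · exact Or.inl (Or.inl (Or.inl h))
          · subst h1 h2; exact Or.inl (Or.inl (Or.inr ⟨rfl, rfl⟩))
          · exact Or.inr (Or.inl ⟨h1, h2, h3⟩)
          · subst h1 h2; exact Or.inl (Or.inr ⟨rfl, rfl⟩)
          · exact Or.inr (Or.inr ⟨h1, h2, h3⟩)
      · rw [if_neg hb, ih]
        constructor
        · rintro (h | ⟨h1, h2, h3⟩ | ⟨h1, h2, h3⟩)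
          · exact Or.inl h
          · exact Or.inr (Or.inl ⟨h1, List.mem_cons_of_mem _ h2, h3⟩)
          · exact Or.inr (Or.inr ⟨h1, List.mem_cons_of_mem _ h2, h3⟩)
        · rintro (h | ⟨h1, h2, h3⟩ | ⟨h1, h2, h3⟩)
          · exact Or.inl h
          · rcases List.mem_cons.mp h2 with rfl | h2'
            · subst h1; exact absurd h3 (by simpa using hb)
            · exact Or.inr (Or.inl ⟨h1, h2', h3⟩)
          · rcases List.mem_cons.mp h2 with rfl | h2'
            · subst h1; exact absurd h3 (by simpa using hb)
            · exact Or.inr (Or.inr ⟨h1, h2', h3⟩)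

theorem mem_nearPairs (l : List String) (hnd : l.Nodup) (u c : String)
    (s : PySem.Set (String × String)) :
    (u, c) ∈ nearPairs l s
      ↔ (u, c) ∈ s ∨ (u ∈ l ∧ c ∈ l ∧ u ≠ c ∧ distOne u c = true) := by
  induction l generalizing s with
  | nil => simp [nearPairs]
  | cons a t ih =>
      have ha : a ∉ t := (List.nodup_cons.mp hnd).1
      have hndt : t.Nodup := (List.nodup_cons.mp hnd).2
      rw [nearPairs, ih hndt, mem_innerB]
      have hsym : ∀ x y : String, distOne x y = distOne y x := by
        intro x y; rw [distOne_eq, distOne_eq, getDistance_comm]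
      constructor
      · rintro ((h | ⟨h1, h2, h3⟩ | ⟨h1, h2, h3⟩) | ⟨h1, h2, h3, h4⟩)
        · exact Or.inl h
        · subst h1
          refine Or.inr ⟨List.mem_cons_self, List.mem_cons_of_mem _ h2, ?_, h3⟩
          rintro rfl; exact ha h2
        · subst h1
          refine Or.inr ⟨List.mem_cons_of_mem _ h2, List.mem_cons_self, ?_, by rw [hsym]; exact h3⟩
          rintro rfl; exact ha h2
        · exact Or.inr ⟨List.mem_cons_of_mem _ h1, List.mem_cons_of_mem _ h2, h3, h4⟩
      · rintro (h | ⟨h1, h2, h3, h4⟩)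
        · exact Or.inl (Or.inl h)
        · rcases List.mem_cons.mp h1 with rfl | h1'
          · rcases List.mem_cons.mp h2 with rfl | h2'
            · exact absurd rfl h3
            · exact Or.inl (Or.inr (Or.inl ⟨rfl, h2', h4⟩))
          · rcases List.mem_cons.mp h2 with rfl | h2'
            · exact Or.inl (Or.inr (Or.inr ⟨rfl, h1', by rw [← hsym]; exact h4⟩))
            · exact Or.inr ⟨h1', h2', h3, h4⟩

theorem getSNPs_alt_eq_snpRows (table : List String) : getSNPs_alt table = snpRows table := by
  unfold getSNPs_alt snpRows
  apply List.map_congr_left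
  intro u hu
  have hu' : u ∈ table := (PySem.List.mem_dedup _ _).mp hu
  congr 1
  apply List.filter_congr
  intro c hc
  have hcd : c ∈ PySem.List.dedup table := (PySem.List.mem_dedup _ _).mpr hc
  have hmem := mem_nearPairs (PySem.List.dedup table) (PySem.List.nodup_dedup table) u c
      PySem.Set.empty
  by_cases hd : getDistance u c == 1
  · have hne : u ≠ c := by
      rintro rfl
      rw [getDistance_self] at hd
      simp at hd
    have : (u, c) ∈ nearPairs (PySem.List.dedup table) PySem.Set.empty :=
      hmem.mpr (Or.inr ⟨hu, hcd, hne, by rw [distOne_eq]; exact hd⟩)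
    rw [hd]
    exact (PySem.Set.contains_iff _ _).mpr this
  · have hd' : (getDistance u c == 1) = false := by simpa using hd
    rw [hd']
    rcases Bool.eq_false_or_eq_true (PySem.Set.contains (nearPairs (PySem.List.dedup table) PySem.Set.empty) (u, c)) with ht | hf
    · exfalso
      have := hmem.mp ((PySem.Set.contains_iff _ _).mp ht)
      rcases this with h | ⟨_, _, _, h4⟩
      · exact absurd h (List.not_mem_nil)
      · rw [distOne_eq, hd'] at h4; exact Bool.false_ne_true h4
    · exact hf

-- ===== VERDICT (by name: the statement is the Claim_ definition above) =====
theorem getSNPs_spec : Claim_equal_getSNPs := by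
  intro table _
  unfold Spec_getSNPs
  rw [getSNPs_eq_snpRows, getSNPs_alt_eq_snpRows]
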